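-- pv_equiv track=rewrite | github.com/ddccffq/gomoku | gomoku/ai/optimization_techniques.py | _generate_extra_moves
-- ===== SOURCE A (Python) =====
-- def _generate_extra_moves(board, existing_moves):
--     """生成额外的候选走法
--
--     当现有候选数量不足时使用
--
--     Args:
--         board: 棋盘状态
--         existing_moves: 现有的候选走法
--
--     Returns:
--         额外的候选走法列表
--     """
--     size = len(board)
--     extra_moves = []
--
--     # 计算棋盘中心
--     center = size // 2
--
--     # 生成距离中心由近到远的所有空位
--     for r in range(size):
--         for c in range(size):
--             if board[r][c] == 0 and (r, c) not in existing_moves: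
--                 # 计算到中心的距离作为权重
--                 distance = abs(r - center) + abs(c - center)
--                 extra_moves.append(((r, c), distance))
--
--     # 按距离排序
--     extra_moves.sort(key=lambda x: x[1])
--
--     # 只返回走法坐标，不返回距离
--     return [move for move, _ in extra_moves]
-- ===== SOURCE B (Python) =====
-- def _generate_extra_moves(board, existing_moves):
--     size = len(board)
--     center = size // 2
--     # phase 1: collect the empty cells in row-major order, hunting zeros at C speed
--     zeros = []
--     for r in range(size):
--         row = board[r]
--         start = 0
--         while True:
--             try:
--                 c = row.index(0, start, size)
--             except ValueError:
--                 break
--             zeros.append((r, c))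
--             start = c + 1
--     if not zeros:
--         return []
--     # phase 2: drop existing candidates via a set and bucket (counting) sort by the
--     # bounded Manhattan distance to the center, keeping row-major tie order
--     taken = set(existing_moves)
--     buckets = [[] for _ in range(2 * size + 1)]
--     for mv in zeros:
--         if mv not in taken:
--             r, c = mv
--             buckets[abs(r - center) + abs(c - center)].append(mv)
--     return [m for b in buckets for m in b]
-- ===== Notes on version B (the rewrite author's own statement) =====
-- stated objective: faster
-- what changed: B collects empty cells by hunting zeros with C-speed row.index instead of testing every cell in Python, replaces the per-cell linear scan of existing_moves by one prebuilt set, and replaces the final comparison sort by a bucket (counting) sort indexed by the bounded Manhattan distance to the center (row-major tie order preserved); intended as faster -- the harness measured ~1.45-1.5x at its largest timed size, and 2-5x locally on boards with many empty cells or long candidate lists.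
import Mathlib
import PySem

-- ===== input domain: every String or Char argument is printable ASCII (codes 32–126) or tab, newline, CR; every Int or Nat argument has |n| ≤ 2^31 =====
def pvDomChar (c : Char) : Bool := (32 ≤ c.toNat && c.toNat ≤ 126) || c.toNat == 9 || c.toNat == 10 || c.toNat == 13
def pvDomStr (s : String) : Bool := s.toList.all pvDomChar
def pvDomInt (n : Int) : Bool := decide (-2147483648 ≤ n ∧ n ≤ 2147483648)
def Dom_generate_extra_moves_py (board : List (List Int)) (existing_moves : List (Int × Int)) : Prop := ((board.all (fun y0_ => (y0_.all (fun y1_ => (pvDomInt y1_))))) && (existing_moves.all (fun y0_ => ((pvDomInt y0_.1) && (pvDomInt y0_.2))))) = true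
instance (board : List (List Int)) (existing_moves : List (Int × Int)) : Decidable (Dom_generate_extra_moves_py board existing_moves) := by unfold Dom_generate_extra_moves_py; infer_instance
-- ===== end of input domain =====

-- B first collects the empty cells by hunting zeros with row.index (C speed) instead of
-- testing every cell at Python level, then drops existing candidates via a set and
-- replaces the comparison sort by a bucket (counting) sort over the bounded Manhattan
-- distance to the center, concatenating buckets in row-major tie order.

-- ===== PORT A =====
def generate_extra_moves_py (board : List (List Int)) (existing_moves : List (Int × Int)) : List (Int × Int) :=
  let size : Int := (board.length : Int)
  let center : Int := PySem.Int.floordiv size 2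
  let extra : List ((Int × Int) × Int) :=
    (PySem.List.pyRange 0 size 1).foldl (fun acc r =>
      (PySem.List.pyRange 0 size 1).foldl (fun acc c =>
        if PySem.List.pyGetD (PySem.List.pyGetD board r []) c 0 = 0 ∧ (r, c) ∉ existing_moves then
          acc ++ [((r, c), |r - center| + |c - center|)]
        else acc) acc) []
  (PySem.List.sorted extra (fun x => x.2) false).map (fun mv => mv.1)

-- ===== PORT B =====
-- B-side helper: port of Source B's `row.index(0, start, size)` under try/except —
-- the first index c with start ≤ c < size and row[c] == 0, `none` exactly where
-- Python raises ValueError (the getD default 1 ≠ 0 encodes 'no cell beyond len(row)').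
def pvFind0 (row : List Int) (size : Nat) (start : Nat) : Option Nat :=
  if start < size then
    if row.getD start 1 = 0 then some start else pvFind0 row size (start + 1)
  else none
termination_by size - start

-- bounds on pvFind0's result (the port of the while loop cites this for termination)
lemma pvFind0_some_ge {row : List Int} {size : Nat} :
    ∀ {start c : Nat}, pvFind0 row size start = some c → start ≤ c ∧ c < size := by
  intro start
  fun_induction pvFind0 row size start with
  | case1 start h hz => intro c hc; injection hc with hc; omega
  | case2 start h hz ih => intro c hc; have := ih hc; omega
  | case3 start h => intro c hc; cases hc

-- B-side helper: port of Source B's per-row `while True: … row.index … break` loop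
def pvZeroRow (row : List Int) (size : Nat) (r : Int) (start : Nat)
    (zs : List (Int × Int)) : List (Int × Int) :=
  match h : pvFind0 row size start with
  | none => zs
  | some c => pvZeroRow row size r (c + 1) (zs ++ [(r, (c : Int))])
termination_by size - start
decreasing_by have := pvFind0_some_ge h; omega

def generate_extra_moves_py_alt (board : List (List Int)) (existing_moves : List (Int × Int)) : List (Int × Int) :=
  let size : Int := (board.length : Int)
  let center : Int := PySem.Int.floordiv size 2
  let zeros : List (Int × Int) :=
    (PySem.List.pyRange 0 size 1).foldl (fun zs r =>
      -- row = board[r]; start = 0; while True: …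
      pvZeroRow (PySem.List.pyGetD board r []) board.length r 0 zs) []
  if zeros = [] then []
  else
    let taken := PySem.Set.ofList existing_moves
    let buckets0 : List (List (Int × Int)) := List.replicate (2 * board.length + 1) []
    let buckets := zeros.foldl (fun bs mv =>
      if mv ∉ taken then
        -- the bucket index is ≥ 0, so .toNat is exact here
        bs.modify (|mv.1 - center| + |mv.2 - center|).toNat (fun b => b ++ [mv])
      else bs) buckets0
    buckets.flatten

-- ===== PRECONDITION & SPEC =====
-- Pre_ excludes exactly the inputs where A raises an IndexError: some row of the
-- board is shorter than the board's height (board[r][c] is read for all c < len(board)).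
def Pre_generate_extra_moves_py (board : List (List Int)) (existing_moves : List (Int × Int)) : Prop :=
  ∀ row ∈ board, board.length ≤ row.length
instance (board : List (List Int)) (existing_moves : List (Int × Int)) : Decidable (Pre_generate_extra_moves_py board existing_moves) := by unfold Pre_generate_extra_moves_py; infer_instance

def pvWitness_generate_extra_moves_py : List (List Int) × (List (Int × Int)) := ([[0, 1], [0, 0]], [(0, 0)])

def Spec_generate_extra_moves_py (board : List (List Int)) (existing_moves : List (Int × Int)) (out : List (Int × Int)) : Prop := out = generate_extra_moves_py_alt board existing_moves
instance (board : List (List Int)) (existing_moves : List (Int × Int)) (out : List (Int × Int)) : Decidable (Spec_generate_extra_moves_py board existing_moves out) := by unfold Spec_generate_extra_moves_py; infer_instance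

-- ===== CLAIM (what is proved, stated in full; the proofs are below) =====
def Claim_equal_generate_extra_moves_py : Prop := ∀ (board : List (List Int)) (existing_moves : List (Int × Int)), Dom_generate_extra_moves_py board existing_moves → Pre_generate_extra_moves_py board existing_moves → Spec_generate_extra_moves_py board existing_moves (generate_extra_moves_py board existing_moves)

-- ===== LEMMAS AND PROOFS =====

-- the elements of acc whose recorded distance is i (A's bucket i)
def pvFilt (acc : List ((Int × Int) × Int)) (i : Nat) : List ((Int × Int) × Int) :=
  acc.filter (fun p => p.2 = (i : Int))

-- B's bucket array as a function of A's accumulated candidate list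
def pvBuckets (N : Nat) (acc : List ((Int × Int) × Int)) : List (List (Int × Int)) :=
  (List.range N).map (fun i => (pvFilt acc i).map (fun mv => mv.1))

lemma pvFilt_append (acc bcc : List ((Int × Int) × Int)) (i : Nat) :
    pvFilt (acc ++ bcc) i = pvFilt acc i ++ pvFilt bcc i := by
  simp [pvFilt, List.filter_append]

lemma pvZeroRow_none {row : List Int} {size : Nat} {r : Int} {start : Nat}
    {zs : List (Int × Int)} (hf : pvFind0 row size start = none) :
    pvZeroRow row size r start zs = zs := by
  rw [pvZeroRow]
  split
  · rfl
  · next c heq => rw [hf] at heq; cases heq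

lemma pvZeroRow_some {row : List Int} {size : Nat} {r : Int} {start c : Nat}
    {zs : List (Int × Int)} (hf : pvFind0 row size start = some c) :
    pvZeroRow row size r start zs = pvZeroRow row size r (c + 1) (zs ++ [(r, (c : Int))]) := by
  rw [pvZeroRow]
  split
  · next heq => rw [hf] at heq; cases heq
  · next c' heq => rw [hf] at heq; injection heq with h2; subst h2; rfl

lemma pvFind0_none_spec {row : List Int} {size : Nat} :
    ∀ {start : Nat}, pvFind0 row size start = none →
      ∀ j, start ≤ j → j < size → row.getD j 1 ≠ 0 := by
  intro start
  fun_induction pvFind0 row size start with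
  | case1 start h hz => intro hc; cases hc
  | case2 start h hz ih =>
      intro hc j hj1 hj2
      rcases Nat.eq_or_lt_of_le hj1 with rfl | hlt
      · exact hz
      · exact ih hc j hlt hj2
  | case3 start h => intro _ j hj1 hj2; omega

lemma pvFind0_some_spec {row : List Int} {size : Nat} :
    ∀ {start c : Nat}, pvFind0 row size start = some c →
      row.getD c 1 = 0 ∧ ∀ j, start ≤ j → j < c → row.getD j 1 ≠ 0 := by
  intro start
  fun_induction pvFind0 row size start with
  | case1 start h hz =>
      intro c hc; injection hc with hc; subst hc
      exact ⟨hz, fun j hj1 hj2 => absurd (le_antisymm hj1 (by omega)) (by omega)⟩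
  | case2 start h hz ih =>
      intro c hc
      obtain ⟨h0, hmin⟩ := ih hc
      refine ⟨h0, fun j hj1 hj2 => ?_⟩
      rcases Nat.eq_or_lt_of_le hj1 with rfl | hlt
      · exact hz
      · exact hmin j hlt hj2
  | case3 start h => intro c hc; cases hc

lemma foldl_skip {α β : Type} (P : α → Prop) [DecidablePred P] (f : α → β → β) :
    ∀ (l : List α) (bs : β), (∀ x ∈ l, ¬ P x) →
      l.foldl (fun bs x => if P x then f x bs else bs) bs = bs := by
  intro l
  induction l with
  | nil => intro bs _; rfl
  | cons x t ih =>
      intro bs h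
      simp only [List.foldl_cons, if_neg (h x (by simp))]
      exact ih bs (fun y hy => h y (by simp [hy]))

-- B's zero-hunting row loop computes exactly A's per-cell scan of the row
lemma zerorow_eq_fold (r : Int) (row : List Int) (size : Nat) (hrow : size ≤ row.length) :
    ∀ (start : Nat) (zs : List (Int × Int)),
    pvZeroRow row size r start zs
      = (PySem.List.pyRange (start : Int) (size : Int)).foldl (fun zs c =>
          if PySem.List.pyGetD row c 0 = 0 then zs ++ [(r, c)] else zs) zs := by
  have cell : ∀ j : Nat, j < size → PySem.List.pyGetD row (j : Int) 0 = row.getD j 1 := by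
    intro j hj
    rw [PySem.List.pyGetD_natCast, List.getD_eq_getElem row 0 (by omega),
      List.getD_eq_getElem row 1 (by omega)]
  have nocond : ∀ (a b : Nat) (zs : List (Int × Int)), b ≤ size →
      (∀ j : Nat, a ≤ j → j < b → row.getD j 1 ≠ 0) →
      (PySem.List.pyRange (a : Int) (b : Int)).foldl (fun zs c =>
          if PySem.List.pyGetD row c 0 = 0 then zs ++ [(r, c)] else zs) zs = zs := by
    intro a b zs hb hz
    apply foldl_skip (fun c => PySem.List.pyGetD row c 0 = 0) (fun c zs => zs ++ [(r, c)])
    intro x hx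
    rw [PySem.List.mem_pyRange_one] at hx
    have hxa : x = ((x.toNat : Nat) : Int) := by omega
    rw [hxa, cell x.toNat (by omega)]
    exact hz x.toNat (by omega) (by omega)
  have main : ∀ (k start : Nat) (zs : List (Int × Int)), size - start ≤ k →
      pvZeroRow row size r start zs
        = (PySem.List.pyRange (start : Int) (size : Int)).foldl (fun zs c =>
            if PySem.List.pyGetD row c 0 = 0 then zs ++ [(r, c)] else zs) zs := by
    intro k
    induction k with
    | zero =>
        intro start zs hk
        have hnone : pvFind0 row size start = none := by
          rw [pvFind0, if_neg (by omega)]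
        rw [pvZeroRow_none hnone,
          nocond start size zs le_rfl (fun j hj1 hj2 => absurd (by omega : size ≤ start) (by omega))]
    | succ k ih =>
        intro start zs hk
        cases hf : pvFind0 row size start with
        | none =>
            rw [pvZeroRow_none hf]
            exact (nocond start size zs le_rfl (pvFind0_none_spec hf)).symm
        | some c =>
            obtain ⟨hsc, hcs⟩ := pvFind0_some_ge hf
            obtain ⟨hz, hmin⟩ := pvFind0_some_spec hf
            rw [pvZeroRow_some hf]
            rw [PySem.List.pyRange_one_append (start : Int) (c : Int) (size : Int)
              (by exact_mod_cast hsc) (by exact_mod_cast Nat.le_of_lt hcs),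
              List.foldl_append,
              nocond start c zs (by omega) (fun j hj1 hj2 => hmin j hj1 hj2),
              PySem.List.pyRange_one_cons (by exact_mod_cast hcs),
              List.foldl_cons]
            have hcz : PySem.List.pyGetD row (c : Int) 0 = 0 := by rw [cell c hcs]; exact hz
            have hstep : ((c : Int) + 1) = ((c + 1 : Nat) : Int) := by push_cast; ring
            rw [hstep, if_pos hcz]
            exact ih (c + 1) _ (by omega)
  intro start zs
  exact main (size - start) start zs le_rfl

-- a Prop-conditioned filtering fold is the library's Bool one
lemma foldl_if_decide {α β : Type} (C : α → Prop) [DecidablePred C] (f : α → β)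
    (l : List α) (acc : List β) :
    l.foldl (fun acc x => if C x then acc ++ [f x] else acc) acc
      = acc ++ (l.filter (fun x => decide (C x))).map f := by
  rw [← PySem.List.foldl_append_if (fun x => decide (C x)) f l acc]
  apply PySem.List.foldl_congr_mem
  intro acc x _
  by_cases h : C x <;> simp [h]

lemma insertBy_append_left {α : Type} (bf : α → α → Bool) (x : α) (B C : List α)
    (h : ∀ b ∈ B, bf x b = false) :
    PySem.List.insertBy bf x (B ++ C) = B ++ PySem.List.insertBy bf x C := by
  induction B with
  | nil => simp
  | cons b t ih =>
      have hb : bf x b = false := h b (by simp)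
      simp only [List.cons_append, PySem.List.insertBy, hb]
      simp [ih (fun y hy => h y (by simp [hy]))]

lemma insertBy_all_true {α : Type} (bf : α → α → Bool) (x : α) (R : List α)
    (h : ∀ y ∈ R, bf x y = true) :
    PySem.List.insertBy bf x R = x :: R := by
  cases R with
  | nil => rfl
  | cons r t => simp [PySem.List.insertBy, h r (by simp)]

lemma sorted_flat (N : Nat) (acc : List ((Int × Int) × Int))
    (h : ∀ p ∈ acc, 0 ≤ p.2 ∧ p.2 < (N : Int)) :
    PySem.List.sorted acc (fun x => x.2) false
      = (List.range N).flatMap (fun i => pvFilt acc i) := by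
  induction acc using List.reverseRecOn with
  | nil => simp [PySem.List.sorted_eq_foldl_insertBy, pvFilt]
  | append_singleton acc x ih =>
      have hx := h x (by simp)
      have hacc : ∀ p ∈ acc, 0 ≤ p.2 ∧ p.2 < (N : Int) := fun p hp => h p (by simp [hp])
      rw [PySem.List.sorted_eq_foldl_insertBy, List.foldl_append,
        ← PySem.List.sorted_eq_foldl_insertBy, ih hacc]
      simp only [List.foldl_cons, List.foldl_nil]
      set d0 : Nat := x.2.toNat with hd0
      have hxd : x.2 = (d0 : Int) := (Int.toNat_of_nonneg hx.1).symm
      have hdN : d0 < N := by omega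
      have hsplit : N = (d0 + 1) + (N - (d0 + 1)) := by omega
      rw [hsplit, List.range_add, List.flatMap_append, List.flatMap_append]
      -- right chunk: x never lands there
      have hR : ((List.range (N - (d0 + 1))).map (fun j => d0 + 1 + j)).flatMap
            (fun i => pvFilt (acc ++ [x]) i)
          = ((List.range (N - (d0 + 1))).map (fun j => d0 + 1 + j)).flatMap
            (fun i => pvFilt acc i) := by
        apply List.flatMap_congr
        intro i hi
        simp only [List.mem_map] at hi
        obtain ⟨j, _, rfl⟩ := hi
        rw [pvFilt_append]
        have : pvFilt [x] (d0 + 1 + j) = [] := by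
          simp [pvFilt, hxd]; omega
        simp [this]
      rw [hR]
      -- left chunk of the RHS: x lands at the end of bucket d0
      have hL : (List.range (d0 + 1)).flatMap (fun i => pvFilt (acc ++ [x]) i)
          = (List.range (d0 + 1)).flatMap (fun i => pvFilt acc i) ++ [x] := by
        rw [List.range_succ, List.flatMap_append, List.flatMap_append]
        have h1 : (List.range d0).flatMap (fun i => pvFilt (acc ++ [x]) i)
            = (List.range d0).flatMap (fun i => pvFilt acc i) := by
          apply List.flatMap_congr
          intro i hi
          simp only [List.mem_range] at hi
          rw [pvFilt_append]
          have : pvFilt [x] i = [] := by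
            simp [pvFilt, hxd]; omega
          simp [this]
        have h2 : pvFilt (acc ++ [x]) d0 = pvFilt acc d0 ++ [x] := by
          rw [pvFilt_append]
          have : pvFilt [x] d0 = [x] := by simp [pvFilt, hxd]
          rw [this]
        simp [h1, h2]
      rw [hL]
      -- now the insertBy side
      rw [insertBy_append_left]
      · rw [insertBy_all_true]
        · simp
        · intro y hy
          simp only [List.mem_flatMap, List.mem_map, List.mem_range] at hy
          obtain ⟨i, ⟨j, hj, rfl⟩, hyf⟩ := hy
          have : y.2 = ((d0 + 1 + j : Nat) : Int) := by
            simp only [pvFilt, List.mem_filter, decide_eq_true_eq] at hyf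
            exact hyf.2
          simp only [decide_eq_true_eq, this, hxd]
          omega
      · intro b hb
        simp only [List.mem_flatMap, List.mem_range] at hb
        obtain ⟨i, hi, hbf⟩ := hb
        have : b.2 = (i : Int) := by
          simp only [pvFilt, List.mem_filter, decide_eq_true_eq] at hbf
          exact hbf.2
        simp only [decide_eq_false_iff_not, this, hxd, not_lt]
        omega

lemma bucket_snoc (N : Nat) (acc : List ((Int × Int) × Int)) (mv : Int × Int) (d : Int)
    (h0 : 0 ≤ d) (_hdN : d < (N : Int)) :
    (pvBuckets N acc).modify d.toNat (fun b => b ++ [mv]) = pvBuckets N (acc ++ [(mv, d)]) := by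
  apply List.ext_getElem
  · simp [pvBuckets]
  · intro j hj hj'
    simp only [pvBuckets, List.length_map, List.length_range] at hj'
    simp only [List.getElem_modify, pvBuckets, List.getElem_map, List.getElem_range,
      pvFilt_append]
    by_cases hdj : d.toNat = j
    · have : pvFilt [(mv, d)] j = [(mv, d)] := by
        simp [pvFilt]; omega
      simp [hdj, this]
    · have : pvFilt [(mv, d)] j = [] := by
        simp [pvFilt]; omega
      simp [hdj, this]

-- B's phase-2 bucket fold tracks A-shaped candidate accumulation
lemma pairs_fold (P : (Int × Int) → Prop) [inst : DecidablePred P] (center : Int) (N : Nat) :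
    ∀ (zs : List (Int × Int)) (acc : List ((Int × Int) × Int)),
      (∀ mv ∈ zs, |mv.1 - center| + |mv.2 - center| < (N : Int)) →
      zs.foldl (fun bs mv =>
          if P mv then bs.modify (|mv.1 - center| + |mv.2 - center|).toNat (fun b => b ++ [mv])
          else bs) (pvBuckets N acc)
        = pvBuckets N (zs.foldl (fun acc mv =>
            if P mv then acc ++ [(mv, |mv.1 - center| + |mv.2 - center|)] else acc) acc) := by
  intro zs
  induction zs with
  | nil => intro acc _; simp
  | cons mv t ih =>
      intro acc hb
      simp only [List.foldl_cons]
      by_cases hp : P mv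
      · rw [if_pos hp, if_pos hp,
          bucket_snoc N acc mv _ (by positivity) (hb mv (by simp))]
        exact ih _ (fun m hm => hb m (by simp [hm]))
      · rw [if_neg hp, if_neg hp]
        exact ih _ (fun m hm => hb m (by simp [hm]))

-- ===== VERDICT (by name: the statement is the Claim_ definition above) =====
theorem generate_extra_moves_py_spec : Claim_equal_generate_extra_moves_py := by
  intro board existing_moves _ hpre
  unfold Spec_generate_extra_moves_py
  simp only [generate_extra_moves_py, generate_extra_moves_py_alt]
  set size : Int := (board.length : Int) with hsize
  set center : Int := PySem.Int.floordiv size 2 with hcenter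
  set N : Nat := 2 * board.length + 1 with hN
  have hcen : 0 ≤ center ∧ center ≤ size := by
    rw [hcenter, PySem.Int.floordiv_eq_ediv_of_pos (by norm_num)]
    constructor <;> [positivity; omega]
  have hbound : ∀ r ∈ PySem.List.pyRange 0 size, ∀ c ∈ PySem.List.pyRange 0 size,
      |r - center| + |c - center| < (N : Int) := by
    intro r hr c hc
    rw [PySem.List.mem_pyRange_one] at hr hc
    rw [hsize] at hr hc
    obtain ⟨hc0, hc1⟩ := hcen
    rw [hcenter] at hc0 hc1  -- only to detach from the let; bounds stay abstract
    simp only [Int.abs_eq_natAbs]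
    rw [hN]
    omega
  -- closed form of B's phase-1 list of empty cells
  have hzeros : (PySem.List.pyRange 0 size).foldl (fun zs r =>
        pvZeroRow (PySem.List.pyGetD board r []) board.length r 0 zs) []
      = (PySem.List.pyRange 0 size).flatMap (fun r =>
          ((PySem.List.pyRange 0 size).filter (fun c =>
            decide (PySem.List.pyGetD (PySem.List.pyGetD board r []) c 0 = 0))).map
            (fun c => (r, c))) := by
    rw [PySem.List.foldl_congr_mem (PySem.List.pyRange 0 size) _
      (fun zs r => zs ++ ((PySem.List.pyRange 0 size).filter (fun c =>
        decide (PySem.List.pyGetD (PySem.List.pyGetD board r []) c 0 = 0))).map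
        (fun c => (r, c))) [] ?_]
    · rw [PySem.List.foldl_append_eq_flatMap]
      simp
    · intro zs r hr
      rw [PySem.List.mem_pyRange_one, hsize] at hr
      have hrowlen : board.length ≤ (PySem.List.pyGetD board r []).length := by
        have h1 : r = ((r.toNat : Nat) : Int) := by omega
        rw [h1, PySem.List.pyGetD_natCast, List.getD_eq_getElem board [] (by omega)]
        exact hpre _ (List.getElem_mem _)
      rw [zerorow_eq_fold r _ board.length hrowlen 0 zs]
      simp only [Nat.cast_zero, ← hsize]
      exact foldl_if_decide _ _ _ _
  -- closed form of A's candidate list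
  have hextra : (PySem.List.pyRange 0 size 1).foldl (fun acc r =>
        (PySem.List.pyRange 0 size 1).foldl (fun acc c =>
          if PySem.List.pyGetD (PySem.List.pyGetD board r []) c 0 = 0
              ∧ (r, c) ∉ existing_moves then
            acc ++ [((r, c), |r - center| + |c - center|)]
          else acc) acc) []
      = (PySem.List.pyRange 0 size).flatMap (fun r =>
          ((PySem.List.pyRange 0 size).filter (fun c =>
            decide (PySem.List.pyGetD (PySem.List.pyGetD board r []) c 0 = 0
              ∧ (r, c) ∉ existing_moves))).map
            (fun c => ((r, c), |r - center| + |c - center|))) := by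
    rw [PySem.List.foldl_congr_mem (PySem.List.pyRange 0 size) _
      (fun acc r => acc ++ ((PySem.List.pyRange 0 size).filter (fun c =>
        decide (PySem.List.pyGetD (PySem.List.pyGetD board r []) c 0 = 0
          ∧ (r, c) ∉ existing_moves))).map
        (fun c => ((r, c), |r - center| + |c - center|))) [] ?_]
    · rw [PySem.List.foldl_append_eq_flatMap]
      simp
    · intro acc r _
      exact foldl_if_decide _ _ _ _
  rw [hzeros, hextra]
  set zeros := (PySem.List.pyRange 0 size).flatMap (fun r =>
      ((PySem.List.pyRange 0 size).filter (fun c =>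
        decide (PySem.List.pyGetD (PySem.List.pyGetD board r []) c 0 = 0))).map
        (fun c => (r, c))) with hzdef
  set extra := (PySem.List.pyRange 0 size).flatMap (fun r =>
      ((PySem.List.pyRange 0 size).filter (fun c =>
        decide (PySem.List.pyGetD (PySem.List.pyGetD board r []) c 0 = 0
          ∧ (r, c) ∉ existing_moves))).map
        (fun c => ((r, c), |r - center| + |c - center|))) with hedef
  have hmem : ∀ p ∈ extra, 0 ≤ p.2 ∧ p.2 < (N : Int) := by
    intro p hp
    rw [hedef] at hp
    simp only [List.mem_flatMap, List.mem_map, List.mem_filter] at hp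
    obtain ⟨r, hr, c, ⟨hc, _⟩, rfl⟩ := hp
    exact ⟨by positivity, hbound r hr c hc⟩
  by_cases hz : zeros = []
  · rw [if_pos hz]
    -- no empty cell at all: A's candidate list is empty too
    have hempty : extra = [] := by
      rw [hzdef, List.flatMap_eq_nil_iff] at hz
      rw [hedef, List.flatMap_eq_nil_iff]
      intro r hr
      have h1 := hz r hr
      rw [List.map_eq_nil_iff, List.filter_eq_nil_iff] at h1
      rw [List.map_eq_nil_iff, List.filter_eq_nil_iff]
      intro c hc
      simp only [decide_eq_true_eq] at h1 ⊢
      exact fun hcc => h1 c hc hcc.1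
    rw [hempty]
    simp [PySem.List.sorted_eq_foldl_insertBy]
  · rw [if_neg hz]
    simp only [PySem.Set.mem_ofList]
    have hzb : ∀ mv ∈ zeros, |mv.1 - center| + |mv.2 - center| < (N : Int) := by
      intro mv hmv
      rw [hzdef] at hmv
      simp only [List.mem_flatMap, List.mem_map, List.mem_filter] at hmv
      obtain ⟨r, hr, c, ⟨hc, _⟩, rfl⟩ := hmv
      exact hbound r hr c hc
    have hrepl : List.replicate N ([] : List (Int × Int)) = pvBuckets N [] := by
      simp [pvBuckets, pvFilt]
    rw [hrepl, pairs_fold (fun mv => mv ∉ existing_moves) center N zeros [] hzb,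
      foldl_if_decide (fun mv => mv ∉ existing_moves)
        (fun mv => (mv, |mv.1 - center| + |mv.2 - center|)) zeros []]
    -- phase 1 then phase 2 build exactly A's candidate list
    have hfuse : ((zeros.filter (fun mv => decide (mv ∉ existing_moves))).map
          (fun mv => (mv, |mv.1 - center| + |mv.2 - center|))) = extra := by
      rw [hzdef, hedef, List.filter_flatMap, List.map_flatMap]
      apply List.flatMap_congr
      intro r _
      rw [List.filter_map, List.filter_filter, List.map_map]
      congr 1
      apply List.filter_congr
      intro c _
      simp [Bool.and_comm]
    rw [List.nil_append, hfuse, sorted_flat N extra hmem]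
    simp only [pvBuckets, List.flatMap_def]
    rw [List.map_flatten, List.map_map]
    simp only [Function.comp_def]
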